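-- pv_equiv track=rewrite | github.com/gonzabasile/parcial.MAINT.P | TP. PARCIAL.py | normalizar_usuario
-- ===== SOURCE A (Python) =====
-- def normalizar_usuario(nombre):
--     resultado = ""
--     for i in range(len(nombre)):
--         letra = nombre[i]
--         if i == 0:
--             if letra >= "a" and letra <= "z":
--                 letra = chr(ord(letra) - 32)
--         else:
--             if letra >= "A" and letra <= "Z":
--                 letra = chr(ord(letra) + 32)
--         resultado += letra
--     return resultado
-- ===== SOURCE B (Python) =====
-- _UP = {chr(c): chr(c - 32) for c in range(ord('a'), ord('z') + 1)}
-- _LO = {chr(c): chr(c + 32) for c in range(ord('A'), ord('Z') + 1)}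
--
-- def _translate(s, table):
--     return "".join(table.get(c, c) for c in s)
--
-- def normalizar_usuario(nombre):
--     return _translate(nombre[:1], _UP) + _translate(nombre[1:], _LO)
-- ===== Notes on version B (the rewrite author's own statement) =====
-- stated objective: alternative
-- what changed: B precomputes two fixed ASCII case-translation tables (a-z to upper, A-Z to lower) as dicts and maps the head slice nombre[:1] and the tail slice nombre[1:] through table lookup joined once, instead of A's indexed loop that branches on i==0 and range-compares each character while growing the result by repeated string concatenation.
import Mathlib
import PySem

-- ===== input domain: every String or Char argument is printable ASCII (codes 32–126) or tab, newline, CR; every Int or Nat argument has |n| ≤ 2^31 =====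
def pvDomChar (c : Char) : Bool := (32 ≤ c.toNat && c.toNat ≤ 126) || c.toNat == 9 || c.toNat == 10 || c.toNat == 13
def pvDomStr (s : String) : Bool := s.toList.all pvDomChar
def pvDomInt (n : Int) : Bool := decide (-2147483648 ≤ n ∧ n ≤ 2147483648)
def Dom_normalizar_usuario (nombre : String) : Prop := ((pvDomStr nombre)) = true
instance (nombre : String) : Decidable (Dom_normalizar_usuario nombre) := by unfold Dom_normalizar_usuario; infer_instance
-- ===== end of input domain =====

-- B replaces A's indexed loop (branching on i==0 and range-comparing each char) by two precomputed ASCII case-translation tables applied to the head slice and the tail slice: an alternative, table-driven decomposition.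


-- ===== PORT A =====
-- for i in range(len(nombre)): letra = nombre[i]; branch on i == 0; resultado += letra
def normalizar_usuario (nombre : String) : String :=
  let cs := nombre.toList
  let resultado : List Char :=
    (PySem.List.pyRange 0 (cs.length : Int) 1).foldl (fun resultado i =>
      let letra := PySem.List.pyGetD cs i ' '   -- index always in range in A's loop
      let letra :=
        if i == 0 then
          (if 'a' ≤ letra ∧ letra ≤ 'z' then Char.ofNat (letra.toNat - 32) else letra)
        else
          (if 'A' ≤ letra ∧ letra ≤ 'Z' then Char.ofNat (letra.toNat + 32) else letra)
      resultado ++ [letra]) []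
  String.ofList resultado

-- ===== PORT B =====
-- _UP = {chr(c): chr(c - 32) for c in range(ord('a'), ord('z') + 1)}
def pvUpTable : PySem.Dict Char Char :=
  (PySem.List.pyRange 97 123 1).foldl
    (fun d c => d.insert (Char.ofNat c.toNat) (Char.ofNat (c.toNat - 32))) PySem.Dict.empty

-- _LO = {chr(c): chr(c + 32) for c in range(ord('A'), ord('Z') + 1)}
def pvLoTable : PySem.Dict Char Char :=
  (PySem.List.pyRange 65 91 1).foldl
    (fun d c => d.insert (Char.ofNat c.toNat) (Char.ofNat (c.toNat + 32))) PySem.Dict.empty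

-- "".join(table.get(c, c) for c in s)
def pvTranslate (cs : List Char) (table : PySem.Dict Char Char) : List Char :=
  cs.map (fun c => table.getD c c)

def normalizar_usuario_alt (nombre : String) : String :=
  let cs := nombre.toList
  String.ofList (pvTranslate (PySem.List.slice cs none (some 1)) pvUpTable ++
                 pvTranslate (PySem.List.slice cs (some 1) none) pvLoTable)

-- ===== PRECONDITION & SPEC =====
def Spec_normalizar_usuario (nombre : String) (out : String) : Prop := out = normalizar_usuario_alt nombre
instance (nombre : String) (out : String) : Decidable (Spec_normalizar_usuario nombre out) := by unfold Spec_normalizar_usuario; infer_instance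

-- ===== CLAIM (what is proved, stated in full; the proofs are below) =====
def Claim_equal_normalizar_usuario : Prop := ∀ (nombre : String), Dom_normalizar_usuario nombre → Spec_normalizar_usuario nombre (normalizar_usuario nombre)

-- ===== LEMMAS AND PROOFS =====

theorem pvToNat_ofNat (n : Nat) (h : n < 55296) : (Char.ofNat n).toNat = n := by
  unfold Char.ofNat
  rw [dif_pos (Or.inl h)]
  simp [Char.ofNatAux, Char.toNat]

theorem pvChar_eq_of_toNat_eq (a b : Char) (h : a.toNat = b.toNat) : a = b :=
  Char.ext (UInt32.toNat_inj.mp h)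

theorem pvLe_iff (a c : Char) : a ≤ c ↔ a.toNat ≤ c.toNat := by
  rw [Char.le_def, UInt32.le_iff_toNat_le]
  rfl

-- lookup in a table built from a char range of consecutive inserts
theorem getD_range_table (lo : Nat) (f : Nat → Char) (c : Char) :
    ∀ n : Nat, lo + n ≤ 200 →
      ((PySem.List.pyRange (lo : Int) ((lo : Int) + (n : Int)) 1).foldl
        (fun d k => d.insert (Char.ofNat k.toNat) (f k.toNat)) PySem.Dict.empty).getD c c
      = if lo ≤ c.toNat ∧ c.toNat < lo + n then f c.toNat else c := by
  intro n
  induction n with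
  | zero =>
    intro _
    rw [show ((lo : Int) + ((0 : Nat) : Int)) = (lo : Int) by push_cast; ring,
      PySem.List.pyRange_one_eq_nil (le_refl _)]
    simp only [List.foldl_nil, PySem.Dict.getD_empty]
    rw [if_neg (by omega)]
  | succ m ih =>
    intro hle
    rw [show ((lo : Int) + ((m + 1 : Nat) : Int)) = ((lo : Int) + (m : Int)) + 1 by push_cast; ring,
      PySem.List.pyRange_one_succ_right (by omega), List.foldl_append]
    simp only [List.foldl_cons, List.foldl_nil]
    rw [PySem.Dict.getD_insert]
    have hmn : ((lo : Int) + (m : Int)).toNat = lo + m := by omega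
    by_cases hc : c = Char.ofNat (((lo : Int) + (m : Int)).toNat)
    · rw [if_pos hc]
      have hv : c.toNat = lo + m := by
        rw [hc, hmn]
        exact pvToNat_ofNat _ (by omega)
      rw [if_pos (by omega), hv, hmn]
    · rw [if_neg hc, ih (by omega)]
      have hne : c.toNat ≠ lo + m := fun h =>
        hc (pvChar_eq_of_toNat_eq _ _ (by rw [h, hmn, pvToNat_ofNat _ (by omega)]))
      by_cases hin : lo ≤ c.toNat ∧ c.toNat < lo + m
      · rw [if_pos hin, if_pos (by omega)]
      · rw [if_neg hin, if_neg (by omega)]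

theorem up_getD (c : Char) :
    pvUpTable.getD c c = if 'a' ≤ c ∧ c ≤ 'z' then Char.ofNat (c.toNat - 32) else c := by
  have h := getD_range_table 97 (fun m => Char.ofNat (m - 32)) c 26 (by omega)
  norm_num at h
  rw [pvUpTable, h]
  have hiff : (97 ≤ c.toNat ∧ c.toNat < 123) ↔ ('a' ≤ c ∧ c ≤ 'z') := by
    rw [pvLe_iff, pvLe_iff]
    have h97 : Char.toNat 'a' = 97 := rfl
    have h122 : Char.toNat 'z' = 122 := rfl
    rw [h97, h122]
    omega
  by_cases hc : 97 ≤ c.toNat ∧ c.toNat < 123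
  · rw [if_pos hc, if_pos (hiff.mp hc)]
  · rw [if_neg hc, if_neg (fun hh => hc (hiff.mpr hh))]

theorem lo_getD (c : Char) :
    pvLoTable.getD c c = if 'A' ≤ c ∧ c ≤ 'Z' then Char.ofNat (c.toNat + 32) else c := by
  have h := getD_range_table 65 (fun m => Char.ofNat (m + 32)) c 26 (by omega)
  norm_num at h
  rw [pvLoTable, h]
  have hiff : (65 ≤ c.toNat ∧ c.toNat < 91) ↔ ('A' ≤ c ∧ c ≤ 'Z') := by
    rw [pvLe_iff, pvLe_iff]
    have h65 : Char.toNat 'A' = 65 := rfl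
    have h90 : Char.toNat 'Z' = 90 := rfl
    rw [h65, h90]
    omega
  by_cases hc : 65 ≤ c.toNat ∧ c.toNat < 91
  · rw [if_pos hc, if_pos (hiff.mp hc)]
  · rw [if_neg hc, if_neg (fun hh => hc (hiff.mpr hh))]

-- index-map over range equals a direct map (proof-only helper)
theorem map_getD_range {α : Type} (xs : List α) (d : α) (g : α → α) :
    (List.range xs.length).map (fun k => g (xs.getD k d)) = xs.map g := by
  apply List.ext_getElem
  · simp
  intro k h1 h2
  simp at h1 ⊢
  rw [List.getElem?_eq_getElem h1]; rfl

-- A's fold over the index range equals B's head-table/tail-table decomposition.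
theorem normalizar_body_eq (cs : List Char) :
    (PySem.List.pyRange 0 (cs.length : Int) 1).foldl (fun resultado i =>
      let letra := PySem.List.pyGetD cs i ' '
      let letra :=
        if i == 0 then
          (if 'a' ≤ letra ∧ letra ≤ 'z' then Char.ofNat (letra.toNat - 32) else letra)
        else
          (if 'A' ≤ letra ∧ letra ≤ 'Z' then Char.ofNat (letra.toNat + 32) else letra)
      resultado ++ [letra]) [] =
    pvTranslate (PySem.List.slice cs none (some 1)) pvUpTable ++
    pvTranslate (PySem.List.slice cs (some 1) none) pvLoTable := by
  rw [PySem.List.pyRange_zero_natCast, PySem.List.foldl_append_singleton_eq_map, List.map_map,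
    show (1 : Int) = ((1 : Nat) : Int) by norm_num,
    PySem.List.slice_to_natCast, PySem.List.slice_from_natCast]
  cases cs with
  | nil => rfl
  | cons c rest =>
    rw [List.length_cons, List.range_succ_eq_map, List.map_cons, List.map_map]
    show _ = pvTranslate [c] pvUpTable ++ pvTranslate rest pvLoTable
    simp only [pvTranslate, List.map_cons, List.map_nil, List.singleton_append]
    rw [up_getD, ← map_getD_range rest ' '
      (fun x => pvLoTable.getD x x)]
    refine List.cons_eq_cons.mpr ⟨?_, ?_⟩
    · simp [Function.comp]
    · apply List.map_congr_left
      intro k hk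
      simp only [Function.comp, Nat.succ_eq_add_one, Nat.cast_add,
        Nat.cast_one, beq_iff_eq]
      rw [if_neg (by omega), show ((k : Int) + 1) = ((k + 1 : Nat) : Int) by push_cast; ring,
        PySem.List.pyGetD_natCast, lo_getD]
      simp [List.getD]

theorem normalizar_usuario_spec' (nombre : String) :
    normalizar_usuario nombre = normalizar_usuario_alt nombre := by
  simp only [normalizar_usuario, normalizar_usuario_alt]
  generalize nombre.toList = cs
  rw [normalizar_body_eq]

-- ===== VERDICT (by name: the statement is the Claim_ definition above) =====
theorem normalizar_usuario_spec : Claim_equal_normalizar_usuario := by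
  intro nombre _
  exact normalizar_usuario_spec' nombre
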